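-- pv_equiv track=rewrite | github.com/CarsonDavis/shutter-analyzer | frames_smart.py | find_shutter_events
-- ===== SOURCE A (Python) =====
-- def find_shutter_events(brightness_values, threshold):
--     """
--     Finds sequences of frames where the shutter is open.
--
--     Args:
--         brightness_values: List of brightness values for each frame
--         threshold: Brightness threshold for determining shutter state
--
--     Returns:
--         List of (start_frame, end_frame) tuples representing shutter events
--     """
--     events = []
--     current_event = None
--
--     for frame_index, brightness in enumerate(brightness_values):
--         is_open = brightness > threshold
--
--         # Shutter just opened
--         if is_open and current_event is None:
--             current_event = frame_index
--
--         # Shutter just closed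
--         elif not is_open and current_event is not None:
--             events.append((current_event, frame_index - 1))
--             current_event = None
--
--     # Handle case where video ends with shutter open
--     if current_event is not None:
--         events.append((current_event, len(brightness_values) - 1))
--
--     return events
-- ===== SOURCE B (Python) =====
-- from itertools import groupby
--
--
-- def find_shutter_events(brightness_values, threshold):
--     events = []
--     start = 0
--     for is_open, group in groupby(b > threshold for b in brightness_values):
--         length = sum(1 for _ in group)
--         if is_open:
--             events.append((start, start + length - 1))
--         start += length
--     return events
-- ===== Notes on version B (the rewrite author's own statement) =====
-- stated objective: alternative
-- what changed: B builds the boolean open/closed mask and groups it into maximal runs with itertools.groupby, emitting one (start, start+len-1) event per True run, instead of A's pending-start state machine with an end-of-list flush.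
import Mathlib
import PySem

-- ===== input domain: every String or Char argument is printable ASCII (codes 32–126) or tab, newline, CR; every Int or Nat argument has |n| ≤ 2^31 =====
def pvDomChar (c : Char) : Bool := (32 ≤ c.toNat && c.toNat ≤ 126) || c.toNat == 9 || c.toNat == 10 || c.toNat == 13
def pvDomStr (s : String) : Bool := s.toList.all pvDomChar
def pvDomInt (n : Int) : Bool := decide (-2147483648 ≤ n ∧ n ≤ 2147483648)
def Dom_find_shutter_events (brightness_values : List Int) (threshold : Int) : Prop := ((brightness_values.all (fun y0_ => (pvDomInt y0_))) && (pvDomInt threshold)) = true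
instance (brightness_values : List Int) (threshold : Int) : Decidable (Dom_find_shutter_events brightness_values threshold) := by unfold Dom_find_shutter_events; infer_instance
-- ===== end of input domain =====

-- B replaces A's pending-start state machine (current_event sentinel + end-of-list flush)
-- by a mask-then-group-runs decomposition (itertools.groupby); alternative, same O(n) cost.


-- ===== PORT A =====
-- A's for-loop over enumerate(brightness_values) with state (events, current_event),
-- transliterated as structural recursion carrying the frame index.
def pvALoop (threshold : Int) : List Int → Int → List (Int × Int) × Option Int → List (Int × Int) × Option Int
  | [], _, st => st
  | b :: rest, frame_index, (events, current_event) =>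
      let is_open : Bool := decide (b > threshold)
      if is_open && current_event.isNone then
        pvALoop threshold rest (frame_index + 1) (events, some frame_index)
      else if !is_open && current_event.isSome then
        pvALoop threshold rest (frame_index + 1) (events ++ [(current_event.getD 0, frame_index - 1)], none)
      else
        pvALoop threshold rest (frame_index + 1) (events, current_event)

def find_shutter_events (brightness_values : List Int) (threshold : Int) : List (Int × Int) :=
  let st := pvALoop threshold brightness_values 0 ([], none)
  match st.2 with
  | some c => st.1 ++ [(c, (brightness_values.length : Int) - 1)]
  | none => st.1

-- ===== PORT B =====
-- Source B: groupby over the boolean mask; each maximal run of equal mask values is one group,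
-- a True group emits (start, start + length - 1), start advances by the group length.
def pvGroups : List Bool → Int → List (Int × Int)
  | [], _ => []
  | k :: rest, start =>
      let len : Int := 1 + ((rest.takeWhile (fun x => x == k)).length : Int)
      (if k then [(start, start + len - 1)] else []) ++
        pvGroups (rest.dropWhile (fun x => x == k)) (start + len)
termination_by m _ => m.length
decreasing_by
  exact Nat.lt_succ_of_le (List.length_dropWhile_le _ _)

def find_shutter_events_alt (brightness_values : List Int) (threshold : Int) : List (Int × Int) :=
  pvGroups (brightness_values.map (fun b => decide (b > threshold))) 0

-- ===== PRECONDITION & SPEC =====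
def Spec_find_shutter_events (brightness_values : List Int) (threshold : Int) (out : List (Int × Int)) : Prop := out = find_shutter_events_alt brightness_values threshold
instance (brightness_values : List Int) (threshold : Int) (out : List (Int × Int)) : Decidable (Spec_find_shutter_events brightness_values threshold out) := by unfold Spec_find_shutter_events; infer_instance

-- ===== CLAIM (what is proved, stated in full; the proofs are below) =====
def Claim_equal_find_shutter_events : Prop := ∀ (brightness_values : List Int) (threshold : Int), Dom_find_shutter_events brightness_values threshold → Spec_find_shutter_events brightness_values threshold (find_shutter_events brightness_values threshold)

-- ===== LEMMAS AND PROOFS =====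

-- A's flush-after-the-loop, abstracted over the "len - 1" value.
def pvFinish (lastIdx : Int) (st : List (Int × Int) × Option Int) : List (Int × Int) :=
  match st.2 with
  | some c => st.1 ++ [(c, lastIdx)]
  | none => st.1

def pvMask (threshold : Int) (bv : List Int) : List Bool :=
  bv.map (fun b => decide (b > threshold))

-- a leading False is absorbed into (or starts) the False run that pvGroups skips
lemma pvGroups_false_cons (m : List Bool) (i : Int) :
    pvGroups (false :: m) i = pvGroups m (i + 1) := by
  match m with
  | [] => simp [pvGroups]
  | true :: m' =>
      simp [pvGroups, List.takeWhile, List.dropWhile]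
  | false :: m' =>
      simp only [pvGroups, List.takeWhile, List.dropWhile]
      norm_num
      congr 1
      ring

lemma pvALoop_spec (threshold : Int) (bv : List Int) : ∀ (i : Int) (ev : List (Int × Int)),
    (pvFinish (i + (bv.length : Int) - 1) (pvALoop threshold bv i (ev, none))
      = ev ++ pvGroups (pvMask threshold bv) i)
    ∧ ∀ c, pvFinish (i + (bv.length : Int) - 1) (pvALoop threshold bv i (ev, some c))
      = ev ++ [(c, i + (((pvMask threshold bv).takeWhile (fun x => x == true)).length : Int) - 1)]
          ++ pvGroups ((pvMask threshold bv).dropWhile (fun x => x == true))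
              (i + (((pvMask threshold bv).takeWhile (fun x => x == true)).length : Int)) := by
  induction bv with
  | nil =>
      intro i ev
      constructor
      · simp [pvALoop, pvFinish, pvMask, pvGroups]
      · intro c
        simp [pvALoop, pvFinish, pvMask, pvGroups]
  | cons b rest ih =>
      intro i ev
      have hlen : i + (((b :: rest).length : Nat) : Int) - 1 = (i + 1) + ((rest.length : Nat) : Int) - 1 := by
        simp only [List.length_cons]; push_cast; ring
      by_cases hb : b > threshold
      · constructor
        · -- none, open head: loop sets current_event := i; use IH's some-case
          rw [hlen,
            show pvALoop threshold (b :: rest) i (ev, none)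
                = pvALoop threshold rest (i + 1) (ev, some i) from by simp [pvALoop, hb],
            (ih (i + 1) ev).2 i]
          simp only [pvMask, List.map_cons]
          rw [show (decide (b > threshold)) = true by simp [hb]]
          simp only [pvGroups, if_true, List.append_assoc, List.cons_append, List.nil_append]
          ring_nf
        · intro c
          -- some c, open head: run continues, state unchanged
          rw [hlen,
            show pvALoop threshold (b :: rest) i (ev, some c)
                = pvALoop threshold rest (i + 1) (ev, some c) from by simp [pvALoop, hb],
            (ih (i + 1) ev).2 c]
          simp only [pvMask, List.map_cons]
          rw [show (decide (b > threshold)) = true by simp [hb]]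
          simp only [List.takeWhile, List.dropWhile, beq_self_eq_true, List.length_cons]
          push_cast; ring_nf
      · constructor
        · -- none, closed head: nothing happens
          rw [hlen,
            show pvALoop threshold (b :: rest) i (ev, none)
                = pvALoop threshold rest (i + 1) (ev, none) from by simp [pvALoop, hb],
            (ih (i + 1) ev).1]
          simp only [pvMask, List.map_cons]
          rw [show (decide (b > threshold)) = false by simp [hb]]
          rw [pvGroups_false_cons]
        · intro c
          -- some c, closed head: event (c, i-1) is flushed, state becomes none
          rw [hlen,
            show pvALoop threshold (b :: rest) i (ev, some c)
                = pvALoop threshold rest (i + 1) (ev ++ [(c, i - 1)], none) from by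
              simp [pvALoop, hb],
            (ih (i + 1) (ev ++ [(c, i - 1)])).1]
          simp only [pvMask, List.map_cons]
          rw [show (decide (b > threshold)) = false by simp [hb]]
          simp only [List.takeWhile, List.dropWhile]
          norm_num [pvGroups_false_cons, List.append_assoc]

-- ===== VERDICT (by name: the statement is the Claim_ definition above) =====
theorem find_shutter_events_spec : Claim_equal_find_shutter_events := by
  intro bv t _
  unfold Spec_find_shutter_events find_shutter_events find_shutter_events_alt
  have h := (pvALoop_spec t bv 0 []).1
  simp only [pvMask, zero_add] at h
  rcases hst : pvALoop t bv 0 ([], none) with ⟨evs, cur⟩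
  rw [hst] at h
  cases cur with
  | none => simpa [pvFinish] using h
  | some c => simpa [pvFinish] using h
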